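-- pv_equiv track=rewrite | github.com/ReneFabricius/project-euler | pr187.py | greatest_i_lower_than
-- ===== SOURCE A (Python) =====
-- def greatest_i_lower_than(L, lim):
--     s = 0
--     e = len(L)
--     while s != e - 1:
--         m = (s + e) // 2
--         if L[m] > lim:
--             e = m
--         else:
--             s = m
--
--     return s
-- ===== SOURCE B (Python) =====
-- def _search(L, lim, s, w):
--     # interval represented as (start, width); base case: width 1
--     if w == 1:
--         return s
--     h = w // 2
--     m = s + h
--     if L[m] > lim:
--         return _search(L, lim, s, h)
--     return _search(L, lim, m, w - h)
--
--
-- def greatest_i_lower_than(L, lim):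
--     return _search(L, lim, 0, len(L))
-- ===== Notes on version B (the rewrite author's own statement) =====
-- stated objective: alternative
-- what changed: The iterative while-loop over endpoints (s, e) is replaced by a recursive helper over a (start, width) interval representation, recursing on the shrinking width; same probe positions and comparisons in the same order.
import Mathlib
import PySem

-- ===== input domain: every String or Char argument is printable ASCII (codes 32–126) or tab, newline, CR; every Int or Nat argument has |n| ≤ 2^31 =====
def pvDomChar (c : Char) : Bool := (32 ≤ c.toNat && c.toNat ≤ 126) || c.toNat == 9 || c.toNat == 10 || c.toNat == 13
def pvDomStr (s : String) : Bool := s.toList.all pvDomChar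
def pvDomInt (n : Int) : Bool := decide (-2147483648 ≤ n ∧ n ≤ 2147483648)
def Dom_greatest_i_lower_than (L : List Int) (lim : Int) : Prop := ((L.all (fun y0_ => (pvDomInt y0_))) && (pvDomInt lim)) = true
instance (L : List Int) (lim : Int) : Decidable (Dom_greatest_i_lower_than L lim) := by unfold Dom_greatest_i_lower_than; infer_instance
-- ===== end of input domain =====

-- ===== PORT A =====
-- B changes the decomposition: a recursive helper over a (start, width) interval, recursing on
-- the shrinking width, instead of A's iterative (s, e) endpoint loop; same probes in the same
-- order. Objective: alternative (same O(log n) cost).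
-- Port of A's while loop: fuel-bounded tail recursion over the Int state (s, e).
-- Fuel L.length + 1 suffices: each iteration shrinks e - s by at least 1 (totality guard only).
def pvALoop (L : List Int) (lim : Int) : Nat → Int → Int → Int
  | 0, s, _ => s
  | fuel+1, s, e =>
    if s = e - 1 then s
    else
      let m := PySem.Int.floordiv (s + e) 2
      if PySem.List.pyGetD L m 0 > lim then pvALoop L lim fuel s m
      else pvALoop L lim fuel m e

def greatest_i_lower_than (L : List Int) (lim : Int) : Int :=
  pvALoop L lim (L.length + 1) 0 (L.length : Int)

-- ===== PORT B =====
-- Port of Source B's recursive helper _search over (start, width).  Start and width are Nat here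
-- (they are nonnegative throughout the recursion launched by the entry point), so the
-- recursion is structural on the width; the probe s + w/2 is a plain in-range Nat index.
-- The base case 'w ≤ 1' is Python's 'w == 1' plus the w = 0 totality guard (w = 0 is only
-- reached from an empty list, which Pre_ excludes).
def pvBSearch (L : List Int) (lim : Int) (s : Nat) (w : Nat) : Int :=
  if w ≤ 1 then (s : Int)
  else
    let h := w / 2
    let m := s + h
    if L.getD m 0 > lim then pvBSearch L lim s h
    else pvBSearch L lim m (w - h)
termination_by w
decreasing_by all_goals omega

def greatest_i_lower_than_alt (L : List Int) (lim : Int) : Int :=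
  pvBSearch L lim 0 L.length

-- ===== PRECONDITION & SPEC =====
-- Pre_ excludes only the empty list, on which Python A (and B) raise IndexError at L[0].
def Pre_greatest_i_lower_than (L : List Int) (lim : Int) : Prop := L ≠ []
instance (L : List Int) (lim : Int) : Decidable (Pre_greatest_i_lower_than L lim) := by
  unfold Pre_greatest_i_lower_than; infer_instance

def pvWitness_greatest_i_lower_than : List Int × Int := ([1, 3, 5], 3)

def Spec_greatest_i_lower_than (L : List Int) (lim : Int) (out : Int) : Prop := out = greatest_i_lower_than_alt L lim
instance (L : List Int) (lim : Int) (out : Int) : Decidable (Spec_greatest_i_lower_than L lim out) := by unfold Spec_greatest_i_lower_than; infer_instance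

-- ===== CLAIM (what is proved, stated in full; the proofs are below) =====
def Claim_equal_greatest_i_lower_than : Prop := ∀ (L : List Int) (lim : Int), Dom_greatest_i_lower_than L lim → Pre_greatest_i_lower_than L lim → Spec_greatest_i_lower_than L lim (greatest_i_lower_than L lim)

-- ===== LEMMAS AND PROOFS =====
theorem pv_mid (s : Int) (n : Nat) :
    PySem.Int.floordiv (s + (s + n)) 2 = s + (n / 2 : Nat) := by
  rw [PySem.Int.floordiv_eq_ediv_of_pos (by omega)]
  omega

theorem pv_loop_eq (L : List Int) (lim : Int) :
    ∀ (fuel : Nat) (s : Int) (n : Nat), 0 ≤ s → 1 ≤ n → (n : Int) ≤ fuel →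
      pvALoop L lim fuel s (s + n) = pvBSearch L lim s.toNat n := by
  intro fuel
  induction fuel with
  | zero => intro s n _ h1 h2; exact absurd h2 (by push_cast; omega)
  | succ f ih =>
    intro s n hs h1 h2
    rw [pvBSearch]
    simp only [pvALoop]
    by_cases hn : n = 1
    · subst hn
      rw [if_pos (by omega), if_pos (by omega), Int.toNat_of_nonneg hs]
    · rw [if_neg (by omega : ¬ s = s + (n : Int) - 1),
          if_neg (by omega : ¬ n ≤ 1), pv_mid s n]
      have hidx : s + ((n / 2 : Nat) : Int) = ((s.toNat + n / 2 : Nat) : Int) := by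
        push_cast; omega
      rw [hidx, PySem.List.pyGetD_natCast]
      by_cases hc : L.getD (s.toNat + n / 2) 0 > lim
      · rw [if_pos hc, if_pos hc, ← hidx]
        exact ih s (n / 2) hs (by omega) (by push_cast at h2 ⊢; omega)
      · rw [if_neg hc, if_neg hc, ← hidx]
        have := ih (s + ((n / 2 : Nat) : Int)) (n - n / 2)
          (by positivity) (by omega) (by push_cast at h2 ⊢; omega)
        rw [show s + (n : Int) = (s + ((n / 2 : Nat) : Int)) + ((n - n / 2 : Nat) : Int) by
              push_cast; omega,
            this,
            show (s + ((n / 2 : Nat) : Int)).toNat = s.toNat + n / 2 by omega]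

-- ===== VERDICT (by name: the statement is the Claim_ definition above) =====
theorem greatest_i_lower_than_spec : Claim_equal_greatest_i_lower_than := by
  intro L lim _ hpre
  unfold Spec_greatest_i_lower_than greatest_i_lower_than greatest_i_lower_than_alt
  have hlen : 1 ≤ L.length := by
    cases L with
    | nil => exact absurd rfl hpre
    | cons a t => simp
  have := pv_loop_eq L lim (L.length + 1) 0 L.length (le_refl 0) hlen (by push_cast; omega)
  simpa using this
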